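-- pv_equiv track=rewrite | github.com/samhuairen/coursere_Bioinformatics_Specialization | 3_1_compute_distance_motif_text.py | find_motif_pattern_text
-- ===== SOURCE A (Python) =====
-- def hamming_distance(s1, s2):
--     distance = 0
--     for (i,j) in zip(s1, s2):
--         if i != j:
--             distance += 1
--     return distance
--
-- def find_motif_pattern_text(pattern, seq):
--     """ find the kmer that minimize the distance between the patten and the kmer in seq"""
--     len_pat = len(pattern)
--     len_seq = len(seq)
--     distance = []
--     pattern_ = []
--     for i in range(0, len_seq - len_pat +1):
--         window = seq[i:i+len_pat]
--         hm_dist = hamming_distance(window, pattern)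
--         distance.append(hm_dist)
--         pattern_.append(window)
--     distance_sorted = sorted(enumerate(distance), key=lambda x1: x1[1])
--     min_distance_index = distance_sorted[0][0]
--     return pattern_[min_distance_index]
-- ===== SOURCE B (Python) =====
-- def find_motif_pattern_text(pattern, seq):
--     """ find the kmer that minimize the distance between the patten and the kmer in seq"""
--     best = None  # (window, distance) of the earliest minimum seen so far
--     for i in range(len(seq) - len(pattern) + 1):
--         window = seq[i:i+len(pattern)]
--         d = sum(1 for a, b in zip(window, pattern) if a != b)
--         if best is None or d < best[1]:
--             best = (window, d)
--     return best[0]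
-- ===== Notes on version B (the rewrite author's own statement) =====
-- stated objective: simpler
-- what changed: B replaces A's build-two-parallel-lists-then-stable-sort-enumerated-distances approach with a single streaming pass that keeps the strictly-better (hence earliest) minimum window, building no lists and never sorting.
import Mathlib
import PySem

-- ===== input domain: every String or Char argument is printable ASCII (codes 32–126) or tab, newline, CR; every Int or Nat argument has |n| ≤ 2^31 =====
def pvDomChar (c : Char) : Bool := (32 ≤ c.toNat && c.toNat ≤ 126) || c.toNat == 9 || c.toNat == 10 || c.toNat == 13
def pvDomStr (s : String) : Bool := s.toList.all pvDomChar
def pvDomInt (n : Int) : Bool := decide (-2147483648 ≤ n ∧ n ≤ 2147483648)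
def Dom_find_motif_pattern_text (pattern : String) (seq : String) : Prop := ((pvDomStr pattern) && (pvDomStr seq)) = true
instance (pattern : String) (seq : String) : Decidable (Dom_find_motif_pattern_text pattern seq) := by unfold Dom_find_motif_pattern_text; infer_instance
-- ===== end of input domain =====

-- B replaces A's build-two-lists-then-stable-sort with a single streaming pass keeping the
-- strictly-better (hence earliest) minimum; objective: simpler, no list building and no sort.

-- ===== PORT A =====
-- helper hamming_distance
def pvHam (s1 s2 : List Char) : Int :=
  (s1.zip s2).foldl (fun distance p => if p.1 ≠ p.2 then distance + 1 else distance) 0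

def find_motif_pattern_text (pattern : String) (seq : String) : String :=
  let len_pat := PySem.Str.len pattern
  let len_seq := PySem.Str.len seq
  let st := (PySem.List.pyRange 0 (len_seq - len_pat + 1)).foldl
      (fun (acc : List Int × List (List Char)) i =>
        let window := PySem.Chars.slice seq.toList (some i) (some (i + len_pat))
        let hm_dist := pvHam window pattern.toList
        (acc.1 ++ [hm_dist], acc.2 ++ [window])) ([], [])
  let distance_sorted := PySem.List.sorted (PySem.List.enumerate st.1) (fun x1 => x1.2)
  match PySem.List.pyGet? distance_sorted 0 with
  | none => ""   -- Python raises IndexError here (excluded by Pre_)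
  | some p => String.ofList (PySem.List.pyGetD st.2 p.1 [])
      -- pattern_[min_distance_index]; the index is always in range whenever this line is reached

-- ===== PORT B =====
def find_motif_pattern_text_alt (pattern : String) (seq : String) : String :=
  let best := (PySem.List.pyRange 0 (PySem.Str.len seq - PySem.Str.len pattern + 1)).foldl
      (fun (b : Option (List Char × Int)) i =>
        let window := PySem.Chars.slice seq.toList (some i) (some (i + PySem.Str.len pattern))
        let d := (window.zip pattern.toList).foldl (fun acc p => if p.1 ≠ p.2 then acc + 1 else acc) 0
        match b with
        | none => some (window, d)
        | some m => if d < m.2 then some (window, d) else b) none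
  match best with
  | none => ""   -- Python raises TypeError here (excluded by Pre_)
  | some m => String.ofList m.1

-- ===== PRECONDITION & SPEC =====
-- Pre_ excludes len(seq) < len(pattern): there is no window at all, A raises IndexError
def Pre_find_motif_pattern_text (pattern : String) (seq : String) : Prop :=
  PySem.Str.len pattern ≤ PySem.Str.len seq
instance (pattern : String) (seq : String) : Decidable (Pre_find_motif_pattern_text pattern seq) := by unfold Pre_find_motif_pattern_text; infer_instance

def pvWitness_find_motif_pattern_text : String × String := ("ab", "aabba")

def Spec_find_motif_pattern_text (pattern : String) (seq : String) (out : String) : Prop := out = find_motif_pattern_text_alt pattern seq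
instance (pattern : String) (seq : String) (out : String) : Decidable (Spec_find_motif_pattern_text pattern seq out) := by unfold Spec_find_motif_pattern_text; infer_instance

-- ===== CLAIM (what is proved, stated in full; the proofs are below) =====
def Claim_equal_find_motif_pattern_text : Prop := ∀ (pattern : String) (seq : String), Dom_find_motif_pattern_text pattern seq → Pre_find_motif_pattern_text pattern seq → Spec_find_motif_pattern_text pattern seq (find_motif_pattern_text pattern seq)

-- ===== LEMMAS AND PROOFS =====

-- the head of a stable insertion step only depends on the old head
def pvStep {α : Type} (bf : α → α → Bool) (b : Option α) (x : α) : Option α :=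
  match b with
  | none => some x
  | some m => if bf x m then some x else b

theorem pv_head_insertBy {α : Type} (bf : α → α → Bool) (x : α) (ys : List α) :
    (PySem.List.insertBy bf x ys).head? = pvStep bf ys.head? x := by
  cases ys with
  | nil => simp [PySem.List.insertBy, pvStep]
  | cons y t =>
      simp only [PySem.List.insertBy, pvStep, List.head?]
      split_ifs <;> simp

theorem pv_head_foldl_insertBy {α : Type} (bf : α → α → Bool) (l : List α) (acc : List α) :
    (l.foldl (fun acc x => PySem.List.insertBy bf x acc) acc).head?
      = l.foldl (pvStep bf) acc.head? := by
  induction l generalizing acc with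
  | nil => rfl
  | cons x t ih => simp only [List.foldl_cons, ih, pv_head_insertBy]

theorem pv_head_sorted {α κ : Type} [LinearOrder κ] (xs : List α) (key : α → κ) :
    (PySem.List.sorted xs key).head? = xs.foldl (pvStep (fun a b => decide (key a < key b))) none := by
  rw [PySem.List.sorted_eq_foldl_insertBy]
  simpa using pv_head_foldl_insertBy (fun a b => decide (key a < key b)) xs []

-- enumerate of a map over a range pairs each index with its value
theorem pv_enum_map_range {α : Type} (f : Int → α) (k : Nat) :
    ∀ a : Int, PySem.List.enumerate ((PySem.List.pyRange a (a + k)).map f) a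
      = (PySem.List.pyRange a (a + k)).map (fun i => (i, f i)) := by
  induction k with
  | zero =>
      intro a
      have h : PySem.List.pyRange a (a + (0:Nat)) = [] := by
        simp [PySem.List.pyRange]
      rw [h]
      rfl
  | succ m ih =>
      intro a
      have hlt : a < a + ((m : Nat) + 1 : Nat) := by push_cast; omega
      have hco : PySem.List.pyRange a (a + ((m : Nat) + 1 : Nat)) = a :: PySem.List.pyRange (a + 1) (a + 1 + (m : Nat)) := by
        rw [PySem.List.pyRange_one_cons hlt]
        congr 1
        congr 1
        push_cast; omega
      rw [hco]
      simp only [List.map_cons, PySem.List.enumerate_cons, ih (a + 1)]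

-- the simulation: A's option-min fold over (index, dist) pairs matches B's
-- option-min fold over (window, dist) pairs when both walk the same in-bounds indices
theorem pv_sim (w : Int → List Char) (dd : Int → Int) (n : Int) :
    ∀ (l : List Int) (a : Option (Int × Int)) (b : Option (List Char × Int)),
      (∀ x ∈ l, 0 ≤ x ∧ x < n) →
      ((a = none ∧ b = none) ∨
        (∃ i, 0 ≤ i ∧ i < n ∧ a = some (i, dd i) ∧ b = some (w i, dd i))) →
      ((l.foldl (fun s i => pvStep (fun p q : Int × Int => decide (p.2 < q.2)) s (i, dd i)) a = none ∧
        l.foldl (fun s i => match s with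
          | none => some (w i, dd i)
          | some m => if dd i < m.2 then some (w i, dd i) else s) b = none) ∨
        (∃ j, 0 ≤ j ∧ j < n ∧
          l.foldl (fun s i => pvStep (fun p q : Int × Int => decide (p.2 < q.2)) s (i, dd i)) a = some (j, dd j) ∧
          l.foldl (fun s i => match s with
            | none => some (w i, dd i)
            | some m => if dd i < m.2 then some (w i, dd i) else s) b = some (w j, dd j))) := by
  intro l
  induction l with
  | nil => intro a b _ h; simpa using h
  | cons x t ih =>
      intro a b hmem h
      have hx : 0 ≤ x ∧ x < n := hmem x (by simp)
      have hmem' : ∀ y ∈ t, 0 ≤ y ∧ y < n := fun y hy => hmem y (by simp [hy])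
      simp only [List.foldl_cons]
      apply ih _ _ hmem'
      rcases h with ⟨ha, hb⟩ | ⟨i, hi0, hin, ha, hb⟩
      · subst ha; subst hb
        exact Or.inr ⟨x, hx.1, hx.2, rfl, rfl⟩
      · subst ha; subst hb
        by_cases hc : dd x < dd i
        · exact Or.inr ⟨x, hx.1, hx.2, by simp [pvStep, hc], by simp [hc]⟩
        · exact Or.inr ⟨i, hi0, hin, by simp [pvStep, hc], by simp [hc]⟩

theorem pv_pyGet?_zero {α : Type} (l : List α) : PySem.List.pyGet? l 0 = l.head? := by
  cases l <;> simp [PySem.List.pyGet?, PySem.List.pyIdx?]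

theorem pv_stepA_fold_some (dd : Int → Int) :
    ∀ (l : List Int) (m : Int × Int), ∃ m',
      l.foldl (fun s i => pvStep (fun p q : Int × Int => decide (p.2 < q.2)) s (i, dd i)) (some m) = some m' := by
  intro l
  induction l with
  | nil => intro m; exact ⟨m, rfl⟩
  | cons x t ih =>
      intro m
      simp only [List.foldl_cons, pvStep]
      split_ifs <;> apply ih

-- ===== VERDICT (by name: the statement is the Claim_ definition above) =====
theorem find_motif_pattern_text_spec : Claim_equal_find_motif_pattern_text := by
  intro pattern seq _ hpre
  unfold Pre_find_motif_pattern_text at hpre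
  unfold Spec_find_motif_pattern_text
  simp only [find_motif_pattern_text, find_motif_pattern_text_alt]
  have hn : 0 < PySem.Str.len seq - PySem.Str.len pattern + 1 := by omega
  set n := PySem.Str.len seq - PySem.Str.len pattern + 1 with hndef
  set wfun := fun i => PySem.Chars.slice seq.toList (some i) (some (i + PySem.Str.len pattern)) with hwdef
  set dfun := fun i => pvHam (wfun i) pattern.toList with hddef
  set r := PySem.List.pyRange 0 n with hrdef
  -- restate the goal through the abbreviations (definitional)
  show (match PySem.List.pyGet? (PySem.List.sorted (PySem.List.enumerate
          (r.foldl (fun (acc : List Int × List (List Char)) i =>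
            (acc.1 ++ [pvHam (wfun i) pattern.toList], acc.2 ++ [wfun i])) ([], [])).1)
          (fun x1 => x1.2)) 0 with
      | none => ""
      | some p => String.ofList (PySem.List.pyGetD
          (r.foldl (fun (acc : List Int × List (List Char)) i =>
            (acc.1 ++ [pvHam (wfun i) pattern.toList], acc.2 ++ [wfun i])) ([], [])).2 p.1 []))
    = (match r.foldl (fun (s : Option (List Char × Int)) i =>
          match s with
          | none => some (wfun i, dfun i)
          | some m => if dfun i < m.2 then some (wfun i, dfun i) else s) none with
      | none => ""
      | some m => String.ofList m.1)
  -- A's two accumulator lists are maps over the range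
  have hst : r.foldl
      (fun (acc : List Int × List (List Char)) i =>
        (acc.1 ++ [pvHam (wfun i) pattern.toList], acc.2 ++ [wfun i])) ([], [])
      = (r.map dfun, r.map wfun) := by
    rw [PySem.List.foldl_prod_mk (f := fun l i => l ++ [dfun i]) (g := fun l i => l ++ [wfun i])]
    rw [PySem.List.foldl_append_singleton_eq_map dfun, PySem.List.foldl_append_singleton_eq_map wfun]
    simp
  -- enumerate(distance) pairs each range index with its distance
  have henum : PySem.List.enumerate (r.map dfun) = r.map (fun i => (i, dfun i)) := by
    have h0 : n = 0 + (n.toNat : Int) := by omega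
    rw [hrdef, h0]
    exact pv_enum_map_range dfun n.toNat 0
  -- the head of the stable sort is the strict-< running minimum
  have hhead : (PySem.List.sorted (PySem.List.enumerate (r.map dfun)) (fun x1 => x1.2)).head?
      = r.foldl (fun s i => pvStep (fun p q : Int × Int => decide (p.2 < q.2)) s (i, dfun i)) none := by
    rw [henum, pv_head_sorted, List.foldl_map]
  -- run the simulation
  have hmem : ∀ x ∈ r, 0 ≤ x ∧ x < n := by
    intro x hx
    exact PySem.List.mem_pyRange_one.mp hx
  have hsim := pv_sim wfun dfun n r none none hmem (Or.inl ⟨rfl, rfl⟩)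
  -- A's fold cannot be none since the range is nonempty
  have hrne : r = 0 :: PySem.List.pyRange 1 n := by
    rw [hrdef, PySem.List.pyRange_one_cons hn]
    norm_num
  have hsome : ∃ m', r.foldl (fun s i => pvStep (fun p q : Int × Int => decide (p.2 < q.2)) s (i, dfun i)) none = some m' := by
    rw [hrne]
    simp only [List.foldl_cons, pvStep]
    exact pv_stepA_fold_some dfun _ _
  rcases hsim with ⟨hA, _⟩ | ⟨j, hj0, hjn, hA, hB⟩
  · rcases hsome with ⟨m', hm'⟩
    rw [hA] at hm'
    exact absurd hm' (by simp)
  · rw [pv_pyGet?_zero, hst, hhead, hA, hB]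
    -- pattern_[j] = wfun j
    have hj' : PySem.List.pyGetD (r.map wfun) j [] = wfun j := by
      have hjcast : j = ((j.toNat : Nat) : Int) := by omega
      have hncast : n = ((n.toNat : Nat) : Int) := by omega
      rw [hrdef, hjcast, hncast]
      exact PySem.List.pyGetD_map_pyRange wfun n.toNat j.toNat [] (by omega)
    simp [hj']
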